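-- pv_equiv track=rewrite | github.com/demisto/content | Packs/NCSCCyberAsssessmentFramework/Scripts/NCSCReportDetails/NCSCReportDetails.py | calculate_overall
-- ===== SOURCE A (Python) =====
-- def calculate_overall(data: dict = None) -> str:
--     if not data:
--         return ""
--     results = [x["Result"] for x in data]
--     if "Not Achieved" in results:
--         return "Not Achieved"
--     elif "Partially Achieved" in results:
--         return "Partially Achieved"
--     else:
--         return "Achieved"
-- ===== SOURCE B (Python) =====
-- def calculate_overall(data: dict = None) -> str:
--     if not data:
--         return ""
--     rank = {"Not Achieved": 2, "Partially Achieved": 1}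
--     m = 0
--     for x in data:
--         m = max(m, rank.get(x["Result"], 0))
--     return ("Achieved", "Partially Achieved", "Not Achieved")[m]
-- ===== Notes on version B (the rewrite author's own statement) =====
-- stated objective: alternative
-- what changed: Replaces the intermediate results list plus two separate membership scans by a single fold that keeps the maximum severity rank and maps it back to a label.
import Mathlib
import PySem

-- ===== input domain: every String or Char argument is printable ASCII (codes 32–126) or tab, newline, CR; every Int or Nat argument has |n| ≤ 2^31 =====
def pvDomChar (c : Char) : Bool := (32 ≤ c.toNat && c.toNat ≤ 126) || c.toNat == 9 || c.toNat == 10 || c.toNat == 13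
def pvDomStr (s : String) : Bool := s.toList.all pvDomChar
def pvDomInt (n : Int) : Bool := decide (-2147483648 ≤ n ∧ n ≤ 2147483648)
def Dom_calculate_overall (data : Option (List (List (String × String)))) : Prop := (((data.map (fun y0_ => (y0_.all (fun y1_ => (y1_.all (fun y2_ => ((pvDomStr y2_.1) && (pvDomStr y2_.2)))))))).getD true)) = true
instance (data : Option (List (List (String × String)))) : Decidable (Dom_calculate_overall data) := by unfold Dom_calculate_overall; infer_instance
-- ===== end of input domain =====

-- B replaces A's intermediate results list and two membership scans by a single
-- max-severity fold mapped back to a label (objective: alternative; same asymptotic cost).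


-- dict lookup x["Result"]: first matching key (exact for a Python dict rendered as an association list)
def pvLookup (x : List (String × String)) (k : String) : Option String :=
  (x.find? (fun p => p.1 == k)).map (fun p => p.2)

-- ===== PORT A =====
def calculate_overall (data : Option (List (List (String × String)))) : String :=
  match data with
  | none => ""
  | some l =>
    if l = [] then ""
    else
      -- results = [x["Result"] for x in data]; KeyError (none) excluded by Pre_
      match l.mapM (fun x => pvLookup x "Result") with
      | none => ""   -- KeyError: outside Pre_calculate_overall
      | some results =>
        if results.contains "Not Achieved" then "Not Achieved"
        else if results.contains "Partially Achieved" then "Partially Achieved"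
        else "Achieved"

-- ===== PORT B =====
def pvRank (r : String) : Int :=
  if r = "Not Achieved" then 2 else if r = "Partially Achieved" then 1 else 0

def calculate_overall_alt (data : Option (List (List (String × String)))) : String :=
  match data with
  | none => ""
  | some l =>
    if l = [] then ""
    else
      -- m = 0; for x in data: m = max(m, rank.get(x["Result"], 0))
      match l.foldl (fun acc x => acc.bind (fun m => (pvLookup x "Result").map (fun r => max m (pvRank r)))) (some (0 : Int)) with
      | none => ""   -- KeyError: outside Pre_calculate_overall
      | some m =>
        -- ("Achieved", "Partially Achieved", "Not Achieved")[m]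
        if m = 2 then "Not Achieved" else if m = 1 then "Partially Achieved" else "Achieved"

-- ===== PRECONDITION & SPEC =====
-- Pre_ excludes only rows missing the "Result" key, on which A raises KeyError.
def Pre_calculate_overall (data : Option (List (List (String × String)))) : Prop :=
  ∀ l ∈ data, ∀ x ∈ l, (pvLookup x "Result").isSome
instance (data : Option (List (List (String × String)))) : Decidable (Pre_calculate_overall data) := by unfold Pre_calculate_overall; infer_instance
def pvWitness_calculate_overall : (Option (List (List (String × String)))) :=
  some [[("Result", "Partially Achieved")], [("Result", "Achieved")]]
def Spec_calculate_overall (data : Option (List (List (String × String)))) (out : String) : Prop := out = calculate_overall_alt data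
instance (data : Option (List (List (String × String)))) (out : String) : Decidable (Spec_calculate_overall data out) := by unfold Spec_calculate_overall; infer_instance

-- ===== CLAIM (what is proved, stated in full; the proofs are below) =====
def Claim_equal_calculate_overall : Prop := ∀ (data : Option (List (List (String × String)))), Dom_calculate_overall data → Pre_calculate_overall data → Spec_calculate_overall data (calculate_overall data)

-- ===== LEMMAS AND PROOFS =====

-- l.mapM succeeds when every row has the key
theorem mapM_lookup (l : List (List (String × String)))
    (h : ∀ x ∈ l, (pvLookup x "Result").isSome) :
    l.mapM (fun x => pvLookup x "Result")
      = some (l.map (fun x => (pvLookup x "Result").getD "")) := by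
  induction l with
  | nil => rfl
  | cons x xs ih =>
    obtain ⟨r, hr⟩ := Option.isSome_iff_exists.mp (h x (by simp))
    simp only [List.mapM_cons, hr, List.map_cons, Option.getD_some]
    rw [ih (fun y hy => h y (by simp [hy]))]
    rfl

-- B's fold on a list whose rows all have the key, started from `some m`.
theorem foldB_some (l : List (List (String × String))) (m : Int)
    (h : ∀ x ∈ l, (pvLookup x "Result").isSome) :
    l.foldl (fun acc x => acc.bind (fun m => (pvLookup x "Result").map (fun r => max m (pvRank r)))) (some m)
      = some (l.foldl (fun m x => max m (pvRank ((pvLookup x "Result").getD ""))) m) := by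
  induction l generalizing m with
  | nil => simp
  | cons x xs ih =>
    have hx := h x (by simp)
    obtain ⟨r, hr⟩ := Option.isSome_iff_exists.mp hx
    simp only [List.foldl_cons, hr, Option.bind_some, Option.map_some, Option.getD_some]
    exact ih _ (fun y hy => h y (by simp [hy]))

-- the left fold of max is max of the start value and a right fold
theorem foldl_max_eq (l : List (List (String × String))) (m : Int) (hm : 0 ≤ m) :
    l.foldl (fun m x => max m (pvRank ((pvLookup x "Result").getD ""))) m
      = max m (l.foldr (fun x r => max (pvRank ((pvLookup x "Result").getD "")) r) 0) := by
  induction l generalizing m with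
  | nil => simp [max_eq_left hm]
  | cons x xs ih =>
    simp only [List.foldl_cons, List.foldr_cons]
    rw [ih _ (le_trans hm (le_max_left _ _)), max_assoc]

-- the max of the ranks is decided by the two membership tests
theorem maxRank_char (l : List (List (String × String))) :
    l.foldr (fun x r => max (pvRank ((pvLookup x "Result").getD "")) r) 0
      = (if (l.map (fun x => (pvLookup x "Result").getD "")).contains "Not Achieved" then 2
         else if (l.map (fun x => (pvLookup x "Result").getD "")).contains "Partially Achieved" then 1
         else 0) := by
  induction l with
  | nil => simp
  | cons x xs ih =>
    simp only [List.foldr_cons, List.map_cons, List.contains_cons]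
    rw [ih]
    rcases Bool.eq_false_or_eq_true ((List.map (fun x => (pvLookup x "Result").getD "") xs).contains "Not Achieved") with hna | hna <;>
      rcases Bool.eq_false_or_eq_true ((List.map (fun x => (pvLookup x "Result").getD "") xs).contains "Partially Achieved") with hpa | hpa <;>
        simp only [hna, hpa, Bool.or_true, Bool.or_false] <;>
        unfold pvRank <;>
        by_cases h2 : ((pvLookup x "Result").getD "") = "Not Achieved" <;>
          by_cases h1 : ((pvLookup x "Result").getD "") = "Partially Achieved" <;>
            (try simp [h2, h1]) <;> (try split_ifs) <;> first | rfl | omega | simp_all [eq_comm]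

theorem calculate_overall_eq (data : Option (List (List (String × String))))
    (hp : Pre_calculate_overall data) :
    calculate_overall data = calculate_overall_alt data := by
  unfold calculate_overall calculate_overall_alt
  match data with
  | none => rfl
  | some l =>
    simp only
    by_cases hl : l = []
    · simp [hl]
    · simp only [if_neg hl]
      have hall : ∀ x ∈ l, (pvLookup x "Result").isSome := fun x hx => hp l rfl x hx
      rw [mapM_lookup l hall, foldB_some l 0 hall, foldl_max_eq l 0 le_rfl, maxRank_char l]
      by_cases hna : (l.map (fun x => (pvLookup x "Result").getD "")).contains "Not Achieved" <;>
        by_cases hpa : (l.map (fun x => (pvLookup x "Result").getD "")).contains "Partially Achieved" <;>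
          simp only [hna, hpa] <;> norm_num

-- ===== VERDICT (by name: the statement is the Claim_ definition above) =====
theorem calculate_overall_spec : Claim_equal_calculate_overall := by
  intro data _ hp
  exact calculate_overall_eq data hp
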